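-- pv_equiv track=rewrite | github.com/kristinkabaikova/lab1 | server.py | message_processing
-- ===== SOURCE A (Python) =====
-- def get_control_bits(word_length):
--     control_bits = []
--     bit = 1
--     while bit < word_length + len(control_bits):
--         if not bit & (bit - 1):
--             control_bits.append(bit - 1)
--         bit += 1
--     return control_bits
--
-- def get_words(data, word_length, control_bits_number):
--     for i in range(len(data)):
--         if not i % (word_length + control_bits_number):
--             yield data[i:i + word_length  + control_bits_number]
--
-- def ham_decode(word, control_bits):
--     bad_index = 0
--     pow2 = 1
--     for control_bit_index in range(len(control_bits)):
--         control_bit = control_bits[control_bit_index]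
--         ones_number = 0
--         for i in range(len(word) - control_bit):
--             if i % (pow2 * 2) >= pow2:
--                 continue
--             if word[control_bit + i] == '1':
--                 ones_number ^= 1
--         if ones_number == 1:
--             bad_index |= (1 << control_bit_index)
--         pow2 *= 2
--     return bad_index
--
-- def message_processing(message, word_length):
--     control_bits = get_control_bits(word_length)
--     mistakes = []
--     corrected_message = ''
--     correctly_delivered = 0
--     uncorrectly_delivered = 0
--     fixed = 0
--     word_index = 0
--     for word in get_words(message, word_length, len(control_bits)):
--         bad_index = ham_decode(word, control_bits)
--         if bad_index != 0:
--             uncorrectly_delivered += 1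
--             if bad_index > len(word):
--                 bad_index = "Множественные ошибки"
--             else:
--                 fixed += 1
--                 s = '0'
--                 if word[bad_index-1] == '0':
--                     s = '1'
--                 word = word[:bad_index-1] + s + word[bad_index:]
--             mistakes.append((word_index + 1, bad_index))
--         else:
--             correctly_delivered += 1
--         corrected_message += word
--         word_index += 1
--     return fixed, correctly_delivered, uncorrectly_delivered
-- ===== SOURCE B (Python) =====
-- def message_processing(message, word_length):
--     # r = number of Hamming control bits: smallest r with 2**r >= word_length + r
--     r = 0
--     while (1 << r) < word_length + r:
--         r += 1
--     n = word_length + r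
--     mask = (1 << r) - 1
--     fixed = correct = wrong = 0
--     for start in range(0, len(message), n):
--         word = message[start:start + n]
--         syndrome = 0
--         for pos, ch in enumerate(word, 1):
--             if ch == '1':
--                 syndrome ^= pos
--         syndrome &= mask
--         if syndrome == 0:
--             correct += 1
--         else:
--             wrong += 1
--             if syndrome <= len(word):
--                 fixed += 1
--     return fixed, correct, wrong
-- ===== Notes on version B (the rewrite author's own statement) =====
-- stated objective: faster
-- what changed: Instead of rescanning each word once per parity bit (inner loop per control bit) over a materialised control-bit list, B computes the Hamming syndrome of each word in a single pass as the XOR of the 1-based positions of its '1' characters (masked to the control-bit count), and finds the control-bit count by a direct minimality loop rather than growing a list; …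
-- outside the precondition, e.g. on message_processing('', 0): A returns (0, 0, 0), B raises ValueError; on message_processing('1', 0): A raises ZeroDivisionError, B raises ValueError; on message_processing('10101', -2): A returns (0, 3, 0), B returns (0, 0, 0)
import Mathlib
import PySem

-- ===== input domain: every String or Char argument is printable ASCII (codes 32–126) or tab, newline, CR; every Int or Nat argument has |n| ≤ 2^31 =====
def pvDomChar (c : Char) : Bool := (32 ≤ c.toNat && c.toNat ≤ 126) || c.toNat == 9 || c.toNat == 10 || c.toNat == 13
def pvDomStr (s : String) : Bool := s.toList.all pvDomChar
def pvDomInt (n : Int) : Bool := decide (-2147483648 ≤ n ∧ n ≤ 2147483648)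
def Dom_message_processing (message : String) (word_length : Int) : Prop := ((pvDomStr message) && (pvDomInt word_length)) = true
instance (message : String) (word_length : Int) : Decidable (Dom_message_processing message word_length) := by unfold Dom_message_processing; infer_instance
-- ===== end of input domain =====

-- B replaces A's per-control-bit rescans of each word by a single XOR-of-positions pass per word
-- (syndrome = XOR of 1-based positions of '1' bits, masked to the control-bit count): objective faster.

-- ===== PORT A =====
-- while-loop of get_control_bits, ported with fuel (fuel 2*|wl|+4 provably exceeds the loop's
-- iteration count for every word_length; see gcbLoop_spec below)
def gcbLoop (word_length : Int) : Nat → Int → List Int → List Int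
  | 0, _, control_bits => control_bits
  | fuel + 1, bit, control_bits =>
    if bit < word_length + control_bits.length then
      gcbLoop word_length fuel (bit + 1)
        (if PySem.Int.band bit (bit - 1) = 0 then control_bits ++ [bit - 1] else control_bits)
    else control_bits

def get_control_bits (word_length : Int) : List Int :=
  gcbLoop word_length (2 * word_length.toNat + 4) 1 []

-- ham_decode; strings are handled as List Char throughout
def ham_decode (word : List Char) (control_bits : List Int) : Int :=
  ((List.range control_bits.length).foldl
    (fun (s : Int × Int) (control_bit_index : Nat) =>
      let bad_index := s.1
      let pow2 := s.2
      let control_bit := PySem.List.pyGetD control_bits (control_bit_index : Int) 0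
      let ones_number : Int :=
        (PySem.List.pyRange 0 ((word.length : Int) - control_bit) 1).foldl
          (fun ones i =>
            if PySem.Int.mod i (pow2 * 2) ≥ pow2 then ones
            else if PySem.List.pyGetD word (control_bit + i) ' ' = '1' then
              PySem.Int.bxor ones 1
            else ones)
          0
      let bad_index := if ones_number = 1 then
          PySem.Int.bor bad_index (((1 : Nat) <<< control_bit_index : Nat) : Int)
        else bad_index
      (bad_index, pow2 * 2))
    (0, 1)).1

-- loop state of message_processing (mistakes may hold the Russian marker string in place of an index)
structure AState where
  mistakes : List (Int × (Int ⊕ String))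
  corrected_message : List Char
  correctly_delivered : Int
  uncorrectly_delivered : Int
  fixed : Int
  word_index : Int
deriving Repr, DecidableEq

def message_processing (message : String) (word_length : Int) : List Int :=
  let data := message.toList
  let control_bits := get_control_bits word_length
  -- get_words materialised: the generator yields data[i:i+n] for each i in range(len(data)) with i % n == 0
  let words := (PySem.List.pyRange 0 (data.length : Int) 1).foldl
    (fun ws i =>
      if PySem.Int.mod i (word_length + (control_bits.length : Int)) = 0 then
        ws ++ [PySem.List.slice data (some i) (some (i + word_length + (control_bits.length : Int)))]
      else ws) []
  let final := words.foldl
    (fun (st : AState) word =>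
      let bad_index := ham_decode word control_bits
      if bad_index ≠ 0 then
        let st := { st with uncorrectly_delivered := st.uncorrectly_delivered + 1 }
        if bad_index > (word.length : Int) then
          let st := { st with mistakes := st.mistakes ++ [(st.word_index + 1, Sum.inr "Множественные ошибки")] }
          { st with corrected_message := st.corrected_message ++ word,
                    word_index := st.word_index + 1 }
        else
          let st := { st with fixed := st.fixed + 1 }
          let s : Char := '0'
          let s := if PySem.List.pyGetD word (bad_index - 1) ' ' = '0' then '1' else s
          let word := PySem.List.slice word none (some (bad_index - 1)) ++ [s] ++
                      PySem.List.slice word (some bad_index) none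
          let st := { st with mistakes := st.mistakes ++ [(st.word_index + 1, Sum.inl bad_index)] }
          { st with corrected_message := st.corrected_message ++ word,
                    word_index := st.word_index + 1 }
      else
        let st := { st with correctly_delivered := st.correctly_delivered + 1 }
        { st with corrected_message := st.corrected_message ++ word,
                  word_index := st.word_index + 1 })
    ⟨[], [], 0, 0, 0, 0⟩
  [final.fixed, final.correctly_delivered, final.uncorrectly_delivered]

-- ===== PORT B =====
-- B's r-loop (while (1 << r) < word_length + r: r += 1), ported with fuel; the loop runs at
-- most word_length.toNat steps (the condition forces r < word_length), so the fuel below suffices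
def altRLoop (word_length : Int) : Nat → Nat → Nat
  | 0, r => r
  | fuel + 1, r =>
    if ((1 <<< r : Nat) : Int) < word_length + (r : Nat) then altRLoop word_length fuel (r + 1)
    else r

def message_processing_alt (message : String) (word_length : Int) : List Int :=
  let r := altRLoop word_length (word_length.toNat + 1) 0
  let n := word_length + (r : Int)
  let mask : Int := ((1 <<< r : Nat) : Int) - 1
  let data := message.toList
  let final := (PySem.List.pyRange 0 (data.length : Int) n).foldl
    (fun (s : Int × Int × Int) start =>
      let word := PySem.List.slice data (some start) (some (start + n))
      let syndrome : Int := (PySem.List.enumerate word 1).foldl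
        (fun syn pc => if pc.2 = '1' then PySem.Int.bxor syn pc.1 else syn) 0
      let syndrome := PySem.Int.band syndrome mask
      if syndrome = 0 then (s.1, s.2.1 + 1, s.2.2)
      else ((if syndrome ≤ (word.length : Int) then s.1 + 1 else s.1), s.2.1, s.2.2 + 1))
    (0, 0, 0)
  [final.1, final.2.1, final.2.2]

-- ===== PRECONDITION & SPEC =====
-- Pre_ excludes word_length ≤ 0: there A either raises ZeroDivisionError (word_length = 0 with a
-- nonempty message) or degenerately counts one empty slice per |word_length| positions as correct
-- (negative word_length), a meaningless corner for Hamming decoding on which B raises ValueError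
-- (step-0 range, word_length = 0) or reports zero words (negative word_length).
def Pre_message_processing (message : String) (word_length : Int) : Prop := 1 ≤ word_length
instance (message : String) (word_length : Int) : Decidable (Pre_message_processing message word_length) := by unfold Pre_message_processing; infer_instance

def pvWitness_message_processing : String × Int := ("1011010", 4)

def Spec_message_processing (message : String) (word_length : Int) (out : List Int) : Prop := out = message_processing_alt message word_length
instance (message : String) (word_length : Int) (out : List Int) : Decidable (Spec_message_processing message word_length out) := by unfold Spec_message_processing; infer_instance

-- ===== CLAIM (what is proved, stated in full; the proofs are below) =====
def Claim_equal_message_processing : Prop := ∀ (message : String) (word_length : Int), Dom_message_processing message word_length → Pre_message_processing message word_length → Spec_message_processing message word_length (message_processing message word_length)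


-- ===== LEMMAS AND PROOFS =====

-- B's syndrome accumulator, on the Nat side (proof-only helper)
def syndAux : List Char → Nat → Nat → Nat
  | [], _, S => S
  | c :: cs, pos, S => syndAux cs (pos + 1) (if c = '1' then S ^^^ pos else S)

-- number of '1' characters whose 1-based position has bit k set (proof-only helper)
def cntK (k : Nat) : List Char → Nat → Nat
  | [], _ => 0
  | c :: cs, pos => (if c = '1' ∧ (pos).testBit k then 1 else 0) + cntK k cs (pos + 1)

theorem pv_enumerate_fold (w : List Char) : ∀ (pos S : Nat),
    (PySem.List.enumerate w ((pos : Nat) : Int)).foldl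
      (fun syn pc => if pc.2 = '1' then PySem.Int.bxor syn pc.1 else syn) ((S : Nat) : Int)
    = ((syndAux w pos S : Nat) : Int) := by
  induction w with
  | nil => intro pos S; simp [PySem.List.enumerate_nil, syndAux]
  | cons c cs ih =>
    intro pos S
    rw [PySem.List.enumerate_cons]
    simp only [List.foldl_cons]
    have hstep : (if c = '1' then PySem.Int.bxor ((S : Nat) : Int) ((pos : Nat) : Int) else ((S : Nat) : Int))
        = (((if c = '1' then S ^^^ pos else S : Nat)) : Int) := by
      by_cases h : c = '1' <;> simp [h, PySem.Int.bxor_natCast]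
    rw [hstep]
    have hpos : ((pos : Nat) : Int) + 1 = (((pos + 1 : Nat)) : Int) := by push_cast; ring
    rw [hpos, ih]
    rfl

theorem pv_testBit_syndAux (k : Nat) (w : List Char) : ∀ (pos S : Nat),
    (syndAux w pos S).testBit k = decide (((S.testBit k).toNat + cntK k w pos) % 2 = 1) := by
  induction w with
  | nil =>
    intro pos S
    rcases h : S.testBit k with _ | _ <;> simp [syndAux, cntK, h]
  | cons c cs ih =>
    intro pos S
    rw [show syndAux (c :: cs) pos S = syndAux cs (pos + 1) (if c = '1' then S ^^^ pos else S) from rfl]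
    rw [ih]
    rw [show cntK k (c :: cs) pos = (if c = '1' ∧ (pos).testBit k then 1 else 0) + cntK k cs (pos + 1) from rfl]
    by_cases hc : c = '1'
    · by_cases hp : pos.testBit k
      · simp only [hc, hp, if_pos, Nat.testBit_xor, if_true]
        rcases h : S.testBit k with _ | _ <;>
          simp only [h, hp, Bool.xor_true, Bool.xor_false, Bool.not_true, Bool.not_false,
            Bool.toNat_true, Bool.toNat_false, and_true, if_true] <;>
          apply decide_eq_decide.mpr <;> omega
      · simp only [hc, if_true, Nat.testBit_xor, hp]
        have : (S ^^^ pos).testBit k = S.testBit k := by simp [Nat.testBit_xor, hp]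
        rcases h : S.testBit k with _ | _ <;> simp [h, hp, Nat.testBit_xor]
    · simp [hc]

theorem pv_cntK_countP (k : Nat) (w : List Char) : ∀ (pos : Nat),
    cntK k w pos = (List.range w.length).countP
      (fun q => decide (w.getD q ' ' = '1') && (pos + q).testBit k) := by
  induction w with
  | nil => intro pos; simp [cntK]
  | cons c cs ih =>
    intro pos
    rw [show cntK k (c :: cs) pos = (if c = '1' ∧ (pos).testBit k then 1 else 0) + cntK k cs (pos + 1) from rfl]
    rw [List.length_cons, List.range_succ_eq_map, List.countP_cons, List.countP_map]
    have hrest : (List.range cs.length).countP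
        ((fun q => decide ((c :: cs).getD q ' ' = '1') && (pos + q).testBit k) ∘ Nat.succ)
        = (List.range cs.length).countP (fun q => decide (cs.getD q ' ' = '1') && ((pos + 1) + q).testBit k) := by
      apply List.countP_congr
      intro q _
      simp only [Function.comp_apply, List.getD_cons_succ, Nat.succ_eq_add_one]
      have heq : pos + (q + 1) = pos + 1 + q := by omega
      rw [heq]
    rw [hrest, ← ih]
    by_cases h1 : c = '1' <;> by_cases h2 : pos.testBit k <;>
      simp [h1, h2, Nat.add_comm]

theorem pv_mod_lt_iff (j k : Nat) : j % (2 ^ k * 2) < 2 ^ k ↔ j / 2 ^ k % 2 = 0 := by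
  have h := Nat.mod_mul (a := 2 ^ k) (b := 2) (x := j)
  have h2 : j % 2 ^ k < 2 ^ k := Nat.mod_lt _ (Nat.two_pow_pos k)
  rcases Nat.mod_two_eq_zero_or_one (j / 2 ^ k) with h3 | h3 <;> rw [h3] at h <;> omega

theorem pv_testBit_two_pow_add (k j : Nat) :
    (2 ^ k + j).testBit k = decide (j % (2 ^ k * 2) < 2 ^ k) := by
  rw [Nat.testBit_eq_decide_div_mod_eq]
  have hd : (2 ^ k + j) / 2 ^ k = j / 2 ^ k + 1 := by
    rw [Nat.add_comm]
    exact Nat.add_div_right j (Nat.two_pow_pos k)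
  rw [hd]
  apply decide_eq_decide.mpr
  rw [pv_mod_lt_iff]
  omega

theorem pv_lor_two_pow (a k : Nat) (h : a < 2 ^ k) : a ||| 2 ^ k = a + 2 ^ k := by
  apply Nat.eq_of_testBit_eq
  intro i
  rw [Nat.testBit_lor]
  rcases lt_trichotomy i k with hik | rfl | hik
  · have e : 2 ^ k = 2 ^ (k - i) * 2 ^ i := by rw [← pow_add]; congr 1; omega
    have heven : 2 ^ (k - i) % 2 = 0 := by
      have : 2 ^ (k - i) = 2 * 2 ^ (k - i - 1) := by
        rw [← pow_succ']
        congr 1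
        omega
      omega
    have h2 : (2 ^ k).testBit i = false := by
      rw [Nat.testBit_eq_decide_div_mod_eq, Nat.pow_div (le_of_lt hik) (by norm_num)]
      simp [heven]
    have h4 : (a + 2 ^ k).testBit i = a.testBit i := by
      rw [Nat.testBit_eq_decide_div_mod_eq, Nat.testBit_eq_decide_div_mod_eq, e,
        Nat.add_mul_div_right _ _ (Nat.two_pow_pos i)]
      apply decide_eq_decide.mpr
      omega
    rw [h2, h4]
    simp
  · have h2 : a.testBit i = false := Nat.testBit_lt_two_pow h
    have h6 : ((2:Nat) ^ i).testBit i = true := by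
      rw [Nat.testBit_eq_decide_div_mod_eq, Nat.div_self (Nat.two_pow_pos i)]
      decide
    have h4 : (a + 2 ^ i).testBit i = true := by
      rw [Nat.testBit_eq_decide_div_mod_eq,
        Nat.add_div_right a (Nat.two_pow_pos i), Nat.div_eq_of_lt h]
      decide
    rw [h2, h4, h6]
    rfl
  · have hp : (2:Nat) ^ (k+1) ≤ 2 ^ i := Nat.pow_le_pow_right (by norm_num) hik
    have hs : (2:Nat) ^ (k+1) = 2 ^ k * 2 := by rw [pow_succ]
    have h1 : a.testBit i = false := Nat.testBit_lt_two_pow (by omega)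
    have h2 : (2 ^ k).testBit i = false := Nat.testBit_lt_two_pow (by omega)
    have h4 : (a + 2 ^ k).testBit i = false := Nat.testBit_lt_two_pow (by omega)
    rw [h1, h2, h4]
    rfl

theorem pv_bxor_parity (a : Nat) :
    PySem.Int.bxor (((a % 2 : Nat)) : Int) 1 = (((a + 1) % 2 : Nat) : Int) := by
  have : (1 : Int) = ((1 : Nat) : Int) := rfl
  rw [this, PySem.Int.bxor_natCast]
  rcases Nat.mod_two_eq_zero_or_one a with h | h <;> rw [h] <;> norm_num <;> omega

theorem pv_foldl_parity {α : Type} (p : α → Bool) (l : List α) : ∀ (a : Nat),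
    l.foldl (fun (o : Int) x => if p x then PySem.Int.bxor o 1 else o) ((a % 2 : Nat) : Int)
    = (((a + l.countP p) % 2 : Nat) : Int) := by
  induction l with
  | nil => intro a; simp
  | cons x xs ih =>
    intro a
    rw [List.foldl_cons, List.countP_cons]
    by_cases h : p x
    · rw [if_pos h, pv_bxor_parity, ih (a + 1)]
      simp only [h, if_true]
      congr 1
      omega
    · rw [if_neg h, ih a]
      simp [h]

theorem pv_ones_eq (w : List Char) (k : Nat) :
    (PySem.List.pyRange 0 ((w.length : Int) - ((2:Int) ^ k - 1)) 1).foldl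
      (fun (ones : Int) i =>
        if PySem.Int.mod i ((2:Int) ^ k * 2) ≥ (2:Int) ^ k then ones
        else if PySem.List.pyGetD w (((2:Int) ^ k - 1) + i) ' ' = '1' then PySem.Int.bxor ones 1
        else ones) 0
    = ((cntK k w 1 % 2 : Nat) : Int) := by
  have hp : (0:Nat) < 2 ^ k := Nat.two_pow_pos k
  have hcb : ((2:Int) ^ k - 1) = (((2 ^ k - 1 : Nat)) : Int) := by
    push_cast [Nat.one_le_two_pow]
    ring
  by_cases hle : w.length ≤ 2 ^ k - 1
  · have hneg : (w.length : Int) - ((2:Int) ^ k - 1) ≤ 0 := by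
      rw [hcb]
      have : (w.length : Int) ≤ ((2 ^ k - 1 : Nat) : Int) := by exact_mod_cast hle
      omega
    rw [PySem.List.pyRange_one_eq_nil (by omega)]
    simp only [List.foldl_nil]
    have hcnt : cntK k w 1 = 0 := by
      rw [pv_cntK_countP]
      apply List.countP_eq_zero.mpr
      intro q hq
      rw [List.mem_range] at hq
      have hq2 : 1 + q < 2 ^ k := by omega
      simp [Nat.testBit_lt_two_pow hq2]
    simp [hcnt]
  · have hlt : 2 ^ k - 1 < w.length := by omega
    have hM : (w.length : Int) - ((2:Int) ^ k - 1) = ((w.length - (2 ^ k - 1) : Nat) : Int) := by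
      rw [hcb]
      have h1 : ((w.length - (2 ^ k - 1) : Nat) : Int) = (w.length : Int) - ((2 ^ k - 1 : Nat) : Int) := by
        have : 2 ^ k - 1 ≤ w.length := by omega
        push_cast [this]
        ring
      omega
    rw [hM, PySem.List.pyRange_one, List.foldl_map]
    have hbody : (fun (ones : Int) (j : Nat) =>
          if PySem.Int.mod ((0:Int) + (j:Int)) ((2:Int) ^ k * 2) ≥ (2:Int) ^ k then ones
          else if PySem.List.pyGetD w (((2:Int) ^ k - 1) + ((0:Int) + (j:Int))) ' ' = '1' then
            PySem.Int.bxor ones 1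
          else ones)
        = (fun (ones : Int) (j : Nat) =>
          if (decide (j % (2 ^ k * 2) < 2 ^ k) && decide (w.getD (2 ^ k - 1 + j) ' ' = '1')) then
            PySem.Int.bxor ones 1
          else ones) := by
      funext ones j
      have e0 : (0:Int) + (j:Int) = ((j : Nat) : Int) := by ring
      have e1 : (2:Int) ^ k * 2 = ((2 ^ k * 2 : Nat) : Int) := by push_cast; ring
      have e2 : ((2:Int) ^ k - 1) + (j:Int) = ((2 ^ k - 1 + j : Nat) : Int) := by
        rw [hcb]
        push_cast
        ring
      rw [e0, e1, PySem.Int.mod_natCast, e2, PySem.List.pyGetD_natCast]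
      have e4 : (2:Int) ^ k = ((2 ^ k : Nat) : Int) := by push_cast; ring
      by_cases c1 : j % (2 ^ k * 2) < 2 ^ k
      · rw [if_neg (by rw [ge_iff_le, e4, Nat.cast_le]; omega)]
        simp only [c1, decide_true, Bool.true_and]
        by_cases c2 : w.getD (2 ^ k - 1 + j) ' ' = '1' <;> simp [c2]
      · rw [if_pos (by rw [ge_iff_le, e4, Nat.cast_le]; omega)]
        simp [c1]
    simp only [sub_zero, Int.toNat_natCast]
    rw [hbody]
    rw [show (0:Int) = (((0:Nat) % 2 : Nat) : Int) by norm_num]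
    rw [pv_foldl_parity]
    congr 1
    rw [Nat.zero_add, pv_cntK_countP]
    have hsplit : w.length = (2 ^ k - 1) + (w.length - (2 ^ k - 1)) := by omega
    rw [show (List.range w.length).countP
          (fun q => decide (w.getD q ' ' = '1') && (1 + q).testBit k)
        = (List.range ((2 ^ k - 1) + (w.length - (2 ^ k - 1)))).countP
          (fun q => decide (w.getD q ' ' = '1') && (1 + q).testBit k) by rw [← hsplit]]
    rw [List.range_add, List.countP_append, List.countP_map]
    have hzero : (List.range (2 ^ k - 1)).countP
        (fun q => decide (w.getD q ' ' = '1') && (1 + q).testBit k) = 0 := by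
      apply List.countP_eq_zero.mpr
      intro q hq
      rw [List.mem_range] at hq
      have hq2 : 1 + q < 2 ^ k := by omega
      simp [Nat.testBit_lt_two_pow hq2]
    rw [hzero, Nat.zero_add]
    congr 1
    apply List.countP_congr
    intro j _
    simp only [Function.comp_apply]
    have e5 : 1 + (2 ^ k - 1 + j) = 2 ^ k + j := by omega
    rw [e5, pv_testBit_two_pow_add, Bool.and_comm]


theorem pv_ham_fold (w : List Char) (r : Nat) : ∀ (m : Nat), m ≤ r →
    (List.range m).foldl
      (fun (s : Int × Int) (control_bit_index : Nat) =>
        let bad_index := s.1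
        let pow2 := s.2
        let control_bit := PySem.List.pyGetD ((List.range r).map (fun j => (2:Int) ^ j - 1)) (control_bit_index : Int) 0
        let ones_number : Int :=
          (PySem.List.pyRange 0 ((w.length : Int) - control_bit) 1).foldl
            (fun ones i =>
              if PySem.Int.mod i (pow2 * 2) ≥ pow2 then ones
              else if PySem.List.pyGetD w (control_bit + i) ' ' = '1' then PySem.Int.bxor ones 1
              else ones) 0
        let bad_index := if ones_number = 1 then
            PySem.Int.bor bad_index (((1 : Nat) <<< control_bit_index : Nat) : Int)
          else bad_index
        (bad_index, pow2 * 2)) (0, 1)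
    = (((syndAux w 1 0 % 2 ^ m : Nat) : Int), ((2 ^ m : Nat) : Int)) := by
  intro m
  induction m with
  | zero => intro _; simp
  | succ m ih =>
    intro hm
    rw [List.range_succ, List.foldl_append, ih (by omega), List.foldl_cons, List.foldl_nil]
    have hm' : m < r := by omega
    have hcb : PySem.List.pyGetD ((List.range r).map (fun j => (2:Int) ^ j - 1)) ((m : Nat) : Int) 0
        = (2:Int) ^ m - 1 := by
      rw [PySem.List.pyGetD_natCast, PySem.List.getD_map_range _ _ _ _ hm']
    have hpow : ((2 ^ m : Nat) : Int) = (2:Int) ^ m := by push_cast; ring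
    dsimp only
    rw [hcb, hpow, pv_ones_eq w m]
    have hS := pv_testBit_syndAux m w 1 0
    simp only [Nat.zero_testBit, Bool.toNat_false, Nat.zero_add] at hS
    have hmod : syndAux w 1 0 % 2 ^ (m + 1)
        = syndAux w 1 0 % 2 ^ m + 2 ^ m * (syndAux w 1 0 / 2 ^ m % 2) := by
      rw [pow_succ, Nat.mod_mul]
    have hsl : (((1 : Nat) <<< m : Nat) : Int) = ((2 ^ m : Nat) : Int) := by
      rw [Nat.shiftLeft_eq, one_mul]
    by_cases hone : cntK m w 1 % 2 = 1
    · have htb : (syndAux w 1 0).testBit m = true := by rw [hS]; simp [hone]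
      have hdiv : syndAux w 1 0 / 2 ^ m % 2 = 1 := by
        rw [Nat.testBit_eq_decide_div_mod_eq] at htb
        simpa using htb
      rw [if_pos (by rw [hone]; norm_num)]
      rw [hsl, PySem.Int.bor_natCast,
        pv_lor_two_pow _ m (Nat.mod_lt _ (Nat.two_pow_pos m))]
      refine Prod.ext ?_ ?_
      · show ((syndAux w 1 0 % 2 ^ m + 2 ^ m : Nat) : Int) = ((syndAux w 1 0 % 2 ^ (m+1) : Nat) : Int)
        rw [hmod, hdiv, Nat.mul_one]
      · show (2:Int) ^ m * 2 = ((2 ^ (m+1) : Nat) : Int)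
        push_cast
        ring
    · have hone0 : cntK m w 1 % 2 = 0 := by omega
      have htb : (syndAux w 1 0).testBit m = false := by rw [hS]; simp [hone0]
      have hdiv : syndAux w 1 0 / 2 ^ m % 2 = 0 := by
        rw [Nat.testBit_eq_decide_div_mod_eq] at htb
        simpa using htb
      rw [if_neg (by
        rw [hone0]
        intro hcontra
        norm_num at hcontra)]
      refine Prod.ext ?_ ?_
      · show ((syndAux w 1 0 % 2 ^ m : Nat) : Int) = ((syndAux w 1 0 % 2 ^ (m+1) : Nat) : Int)
        rw [hmod, hdiv, Nat.mul_zero, Nat.add_zero]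
      · show (2:Int) ^ m * 2 = ((2 ^ (m+1) : Nat) : Int)
        push_cast
        ring

theorem pv_ham_eq (w : List Char) (r : Nat) :
    ham_decode w ((List.range r).map (fun j => (2:Int) ^ j - 1))
    = ((syndAux w 1 0 % 2 ^ r : Nat) : Int) := by
  show ((List.range ((List.range r).map (fun j => (2:Int) ^ j - 1)).length).foldl _ ((0:Int), (1:Int))).1 = _
  rw [show ((List.range r).map (fun j => (2:Int) ^ j - 1)).length = r by simp]
  rw [pv_ham_fold w r r le_rfl]

theorem pv_two_mul_le_two_pow (r : Nat) : 2 * r ≤ 2 ^ r := by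
  induction r with
  | zero => simp
  | succ n ih =>
    rcases Nat.eq_zero_or_pos n with h | h
    · subst h; norm_num
    · have : 2 ≤ 2 ^ n := Nat.one_lt_two_pow_iff.mpr (by omega)
      calc 2 * (n + 1) = 2 * n + 2 := by ring
        _ ≤ 2 ^ n + 2 ^ n := by omega
        _ = 2 ^ (n + 1) := by ring

theorem pv_altR_from (wl : Int) : ∀ (d k r0 fuel : Nat), k - r0 = d → r0 ≤ k →
    k - r0 ≤ fuel →
    (∀ j, r0 ≤ j → j < k → ((2 ^ j : Nat) : Int) < wl + j) →
    wl + k ≤ ((2 ^ k : Nat) : Int) → altRLoop wl fuel r0 = k := by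
  intro d
  induction d with
  | zero =>
    intro k r0 fuel hd hle _ _ hk
    have : r0 = k := by omega
    subst this
    have hcond : ¬ (((1 <<< r0 : Nat) : Int) < wl + (r0 : Nat)) := by
      rw [Nat.shiftLeft_eq, one_mul]
      push_cast at hk ⊢
      omega
    cases fuel with
    | zero => rfl
    | succ f => rw [altRLoop, if_neg hcond]
  | succ n ih =>
    intro k r0 fuel hd hle hfuel hlt hk
    have hr0k : r0 < k := by omega
    cases fuel with
    | zero => omega
    | succ f =>
      rw [altRLoop, if_pos]
      · exact ih k (r0 + 1) f (by omega) (by omega) (by omega)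
          (fun j h1 h2 => hlt j (by omega) h2) hk
      · rw [Nat.shiftLeft_eq, one_mul]
        exact hlt r0 le_rfl hr0k

theorem pv_k_le (wl : Int) (k : Nat)
    (h4 : ∀ j, j < k → ((2 ^ j : Nat) : Int) < wl + j) : k ≤ wl.toNat + 1 := by
  rcases Nat.eq_zero_or_pos k with rfl | hk
  · omega
  · have hj := h4 (k - 1) (by omega)
    have hmul := pv_two_mul_le_two_pow (k - 1)
    have hcast : ((2 * (k - 1) : Nat) : Int) ≤ ((2 ^ (k - 1) : Nat) : Int) := by exact_mod_cast hmul
    have hkk : ((2 * (k - 1) : Nat) : Int) = 2 * (k : Int) - 2 := by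
      push_cast [hk]
      ring
    have hk1 : ((k - 1 : Nat) : Int) = (k : Int) - 1 := by
      push_cast [hk]
      ring
    rw [hk1] at hj
    omega

theorem pv_gcbLoop_spec (wl : Int) (hwl : 1 ≤ wl) : ∀ (fuel : Nat) (bit : Int) (k : Nat),
    1 ≤ bit → bit ≤ ((2 ^ k : Nat) : Int) → (k = 0 ∨ ((2 ^ (k - 1) : Nat) : Int) < bit) →
    (∀ j, j < k → ((2 ^ j : Nat) : Int) < wl + j) →
    2 * wl + 2 ≤ bit + fuel →
    gcbLoop wl fuel bit ((List.range k).map (fun j => (2:Int) ^ j - 1))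
      = (List.range (altRLoop wl (wl.toNat + 1) 0)).map (fun j => (2:Int) ^ j - 1) := by
  intro fuel
  induction fuel with
  | zero =>
    intro bit k h1 h2 h3 h4 h5
    have hwk : wl + (k : Int) ≤ bit := by
      rcases h3 with rfl | h3
      · simp only [Nat.cast_zero, add_zero]
        omega
      · have hmul := pv_two_mul_le_two_pow (k - 1)
        have hcast : ((2 * (k - 1) : Nat) : Int) ≤ ((2 ^ (k - 1) : Nat) : Int) := by
          exact_mod_cast hmul
        have hlt := lt_of_le_of_lt hcast h3
        rcases Nat.eq_zero_or_pos k with rfl | hk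
        · simp only [Nat.cast_zero, add_zero]; omega
        · have hkk : ((2 * (k - 1) : Nat) : Int) = 2 * (k : Int) - 2 := by
            push_cast [hk]
            ring
          omega
    show gcbLoop wl 0 bit _ = _
    rw [show ∀ cbs, gcbLoop wl 0 bit cbs = cbs from fun _ => rfl]
    have hkle := pv_k_le wl k h4
    have hwl0 : ((wl.toNat : Nat) : Int) = wl := Int.toNat_of_nonneg (by omega)
    rw [pv_altR_from wl k k 0 (wl.toNat + 1) rfl (Nat.zero_le k) (by omega)
      (fun j _ hj => h4 j hj) (le_trans hwk h2)]
  | succ fuel ih =>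
    intro bit k h1 h2 h3 h4 h5
    have hlen : ((List.range k).map (fun j => (2:Int) ^ j - 1)).length = k := by simp
    by_cases hcond : bit < wl + (((List.range k).map (fun j => (2:Int) ^ j - 1)).length : Int)
    · rw [show gcbLoop wl (fuel + 1) bit ((List.range k).map (fun j => (2:Int) ^ j - 1))
          = gcbLoop wl fuel (bit + 1)
              (if PySem.Int.band bit (bit - 1) = 0 then
                ((List.range k).map (fun j => (2:Int) ^ j - 1)) ++ [bit - 1]
              else (List.range k).map (fun j => (2:Int) ^ j - 1)) from by
        rw [gcbLoop, if_pos hcond]]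
      rw [hlen] at hcond
      have hb0 : (0:Int) ≤ bit := by omega
      have hbm : bit = ((bit.toNat : Nat) : Int) := (Int.toNat_of_nonneg hb0).symm
      have hbm1 : bit - 1 = (((bit.toNat - 1 : Nat)) : Int) := by
        have h1' : 1 ≤ bit.toNat := by omega
        push_cast [h1']
        omega
      have hband : PySem.Int.band bit (bit - 1) = ((bit.toNat &&& (bit.toNat - 1) : Nat) : Int) := by
        have hb := PySem.Int.band_natCast bit.toNat (bit.toNat - 1)
        rw [← hbm1, ← hbm] at hb
        exact hb
      rcases Nat.eq_zero_or_pos k with rfl | hk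
      · -- k = 0 : bit = 1, power branch taken
        have hbit1 : bit = 1 := by
          simp only [pow_zero, Nat.cast_one] at h2
          omega
        subst hbit1
        rw [if_pos (by rw [hband]; norm_num)]
        have hlist : ((List.range 0).map (fun j => (2:Int) ^ j - 1)) ++ [(1:Int) - 1]
            = (List.range 1).map (fun j => (2:Int) ^ j - 1) := by
          simp
        rw [hlist]
        apply ih (1 + 1) 1
        · omega
        · norm_num
        · right; norm_num
        · intro j hj
          have : j = 0 := by omega
          subst this
          simp only [pow_zero, Nat.cast_one, Nat.cast_zero, add_zero]
          simp only [Nat.cast_zero, add_zero] at hcond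
          omega
        · omega
      · -- k ≥ 1
        have h2n : bit.toNat ≤ 2 ^ k := by
          rw [hbm] at h2
          exact_mod_cast h2
        have h3n : 2 ^ (k - 1) < bit.toNat := by
          rcases h3 with h30 | h3
          · omega
          · rw [hbm] at h3
            exact_mod_cast h3
        by_cases hpow : bit.toNat = 2 ^ k
        · rw [if_pos (by
            rw [hband, hpow, Nat.and_two_pow_sub_one_eq_mod, Nat.mod_self]
            norm_num)]
          have hbit : bit = ((2 ^ k : Nat) : Int) := by rw [hbm, hpow]
          have hbit1 : bit - 1 = (2:Int) ^ k - 1 := by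
            rw [hbit]
            push_cast
            ring
          have hlist : ((List.range k).map (fun j => (2:Int) ^ j - 1)) ++ [bit - 1]
              = (List.range (k + 1)).map (fun j => (2:Int) ^ j - 1) := by
            rw [List.range_succ, List.map_append, hbit1]
            simp
          rw [hlist]
          apply ih (bit + 1) (k + 1)
          · omega
          · rw [hbit]
            have : (2:Nat) ^ k + 1 ≤ 2 ^ (k + 1) := by
              have := Nat.one_le_two_pow (n := k)
              have : (2:Nat) ^ (k + 1) = 2 ^ k + 2 ^ k := by ring
              omega
            calc ((2 ^ k : Nat) : Int) + 1 = (((2 ^ k + 1 : Nat)) : Int) := by push_cast; ring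
              _ ≤ ((2 ^ (k + 1) : Nat) : Int) := by exact_mod_cast this
          · right
            simp only [Nat.add_sub_cancel]
            rw [hbit]
            omega
          · intro j hj
            rcases Nat.lt_succ_iff_lt_or_eq.mp hj with hj | rfl
            · exact h4 j hj
            · rw [← hbit]
              omega
          · omega
        · have hblt : bit.toNat < 2 ^ k := by omega
          rw [if_neg (by
            rw [hband]
            intro hcontra
            have hzero : bit.toNat &&& (bit.toNat - 1) = 0 := by exact_mod_cast hcontra
            -- bit.toNat and bit.toNat - 1 both have testBit (k-1) set
            have hk1 : (2:Nat) ^ (k - 1) * 2 = 2 ^ k := by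
              rw [← pow_succ]
              congr 1
              omega
            have t1 : bit.toNat.testBit (k - 1) = true := by
              rw [Nat.testBit_eq_decide_div_mod_eq]
              have : bit.toNat / 2 ^ (k - 1) = 1 := by
                apply Nat.div_eq_of_lt_le <;> omega
              simp [this]
            have t2 : (bit.toNat - 1).testBit (k - 1) = true := by
              rw [Nat.testBit_eq_decide_div_mod_eq]
              have : (bit.toNat - 1) / 2 ^ (k - 1) = 1 := by
                apply Nat.div_eq_of_lt_le <;> omega
              simp [this]
            have := Nat.testBit_land bit.toNat (bit.toNat - 1) (k - 1)
            rw [hzero, t1, t2, Nat.zero_testBit] at this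
            simp at this)]
          apply ih (bit + 1) k
          · omega
          · rw [hbm]
            have : bit.toNat + 1 ≤ 2 ^ k := by omega
            calc ((bit.toNat : Nat) : Int) + 1 = (((bit.toNat + 1 : Nat)) : Int) := by push_cast; ring
              _ ≤ ((2 ^ k : Nat) : Int) := by exact_mod_cast this
          · right
            omega
          · exact h4
          · omega
    · rw [show gcbLoop wl (fuel + 1) bit ((List.range k).map (fun j => (2:Int) ^ j - 1))
          = (List.range k).map (fun j => (2:Int) ^ j - 1) from by
        rw [gcbLoop, if_neg hcond]]
      rw [hlen] at hcond
      have hwk : wl + (k : Int) ≤ bit := by omega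
      have hkle := pv_k_le wl k h4
      have hwl0 : ((wl.toNat : Nat) : Int) = wl := Int.toNat_of_nonneg (by omega)
      rw [pv_altR_from wl k k 0 (wl.toNat + 1) rfl (Nat.zero_le k) (by omega)
        (fun j _ hj => h4 j hj) (le_trans hwk h2)]

theorem pv_gcb_eq (wl : Int) (h : 1 ≤ wl) :
    get_control_bits wl = (List.range (altRLoop wl (wl.toNat + 1) 0)).map (fun j => (2:Int) ^ j - 1) := by
  show gcbLoop wl (2 * wl.toNat + 4) 1 ((List.range 0).map (fun j => (2:Int) ^ j - 1)) = _
  apply pv_gcbLoop_spec wl h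
  · norm_num
  · norm_num
  · left; rfl
  · intro j hj; omega
  · have : ((wl.toNat : Nat) : Int) = wl := Int.toNat_of_nonneg (by omega)
    push_cast
    omega

theorem pv_words_eq (L : Nat) (n : Int) (hn : 1 ≤ n) :
    ((PySem.List.pyRange 0 (L : Int) 1).filter (fun i => decide (PySem.Int.mod i n = 0)))
      = PySem.List.pyRange 0 (L : Int) n := by
  have hpos : (0:Int) < n := by omega
  have hmem : ∀ x : Int,
      x ∈ (PySem.List.pyRange 0 (L : Int) 1).filter (fun i => decide (PySem.Int.mod i n = 0))
      ↔ x ∈ PySem.List.pyRange 0 (L : Int) n := by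
    intro x
    rw [List.mem_filter, PySem.List.mem_pyRange_one, PySem.List.mem_pyRange_iff_of_pos hpos]
    rw [decide_eq_true_eq, PySem.Int.mod_eq_zero_iff_dvd]
    constructor
    · rintro ⟨⟨hx0, hxL⟩, hdvd⟩
      exact ⟨hx0, hxL, by simpa using hdvd⟩
    · rintro ⟨hx0, hxL, hdvd⟩
      exact ⟨⟨hx0, hxL⟩, by simpa using hdvd⟩
  have hs1 : ((PySem.List.pyRange 0 (L : Int) 1).filter
      (fun i => decide (PySem.Int.mod i n = 0))).Pairwise (· < ·) :=
    (PySem.List.pairwise_lt_pyRange_one 0 (L : Int)).filter _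
  have hs2 : (PySem.List.pyRange 0 (L : Int) n).Pairwise (· < ·) := by
    rw [PySem.List.pyRange_of_pos _ _ hpos]
    apply List.pairwise_map.mpr
    apply List.Pairwise.imp ?_ (List.pairwise_lt_range)
    intro a b hab
    have : (a : Int) < (b : Int) := by exact_mod_cast hab
    simp only [zero_add]
    exact mul_lt_mul_of_pos_left this hpos
  have hn1 : ((PySem.List.pyRange 0 (L : Int) 1).filter
      (fun i => decide (PySem.Int.mod i n = 0))).Nodup :=
    hs1.imp (fun h => ne_of_lt h)
  have hn2 : (PySem.List.pyRange 0 (L : Int) n).Nodup :=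
    hs2.imp (fun h => ne_of_lt h)
  exact List.Perm.eq_of_pairwise (fun a b _ _ hab hba => absurd hba (lt_asymm hab)) hs1 hs2
    ((List.perm_ext_iff_of_nodup hn1 hn2).mpr hmem)

theorem pv_foldl_rel {sigma tau alpha : Type} (R : sigma → tau → Prop) (f : sigma → alpha → sigma)
    (g : tau → alpha → tau) (l : List alpha)
    (hstep : ∀ s t x, x ∈ l → R s t → R (f s x) (g t x)) :
    ∀ s t, R s t → R (l.foldl f s) (l.foldl g t) := by
  induction l with
  | nil => intro s t h; exact h
  | cons x xs ih =>
    intro s t h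
    exact ih (fun s t y hy => hstep s t y (List.mem_cons_of_mem _ hy)) (f s x) (g t x)
      (hstep s t x List.mem_cons_self h)

theorem pv_enum_fold_lit (w : List Char) :
    (PySem.List.enumerate w 1).foldl
      (fun syn pc => if pc.2 = '1' then PySem.Int.bxor syn pc.1 else syn) 0
    = ((syndAux w 1 0 : Nat) : Int) := by
  have h := pv_enumerate_fold w 1 0
  simpa using h

theorem pv_band_mask (S r : Nat) :
    PySem.Int.band ((S : Nat) : Int) ((((1:Nat) <<< r : Nat) : Int) - 1)
    = ((S % 2 ^ r : Nat) : Int) := by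
  have e : (((1:Nat) <<< r : Nat) : Int) - 1 = ((2 ^ r - 1 : Nat) : Int) := by
    rw [Nat.shiftLeft_eq, one_mul]
    push_cast [Nat.one_le_two_pow]
    ring
  rw [e, PySem.Int.band_natCast, Nat.and_two_pow_sub_one_eq_mod]

theorem pv_foldl_proj {alpha : Type} (f : AState → alpha → AState)
    (g : Int × Int × Int → alpha → Int × Int × Int) (l : List alpha)
    (hstep : ∀ s t x, x ∈ l →
      (s.fixed = t.1 ∧ s.correctly_delivered = t.2.1 ∧ s.uncorrectly_delivered = t.2.2) →
      ((f s x).fixed = (g t x).1 ∧ (f s x).correctly_delivered = (g t x).2.1 ∧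
        (f s x).uncorrectly_delivered = (g t x).2.2)) :
    [(l.foldl f ⟨[], [], 0, 0, 0, 0⟩).fixed,
     (l.foldl f ⟨[], [], 0, 0, 0, 0⟩).correctly_delivered,
     (l.foldl f ⟨[], [], 0, 0, 0, 0⟩).uncorrectly_delivered]
    = [(l.foldl g (0, 0, 0)).1, (l.foldl g (0, 0, 0)).2.1, (l.foldl g (0, 0, 0)).2.2] := by
  have h := pv_foldl_rel (R := fun (s : AState) (t : Int × Int × Int) =>
      s.fixed = t.1 ∧ s.correctly_delivered = t.2.1 ∧ s.uncorrectly_delivered = t.2.2)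
    f g l hstep ⟨[], [], 0, 0, 0, 0⟩ (0, 0, 0) ⟨rfl, rfl, rfl⟩
  simp [h.1, h.2.1, h.2.2]

theorem message_processing_eq (message : String) (word_length : Int)
    (h : 1 ≤ word_length) :
    message_processing message word_length = message_processing_alt message word_length := by
  simp only [message_processing, message_processing_alt]
  rw [pv_gcb_eq word_length h]
  simp only [List.length_map, List.length_range]
  rw [PySem.List.foldl_append_ite
    (p := fun i => PySem.Int.mod i (word_length + ((altRLoop word_length (word_length.toNat + 1) 0 : Nat) : Int)) = 0)
    (f := fun i => PySem.List.slice message.toList (some i)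
      (some (i + word_length + ((altRLoop word_length (word_length.toNat + 1) 0 : Nat) : Int))))]
  rw [List.nil_append]
  rw [pv_words_eq message.toList.length (word_length + ((altRLoop word_length (word_length.toNat + 1) 0 : Nat) : Int))
    (by have := Int.natCast_nonneg (altRLoop word_length (word_length.toNat + 1) 0); omega)]
  rw [List.foldl_map]
  have hassoc : ∀ x : Int, x + word_length + ((altRLoop word_length (word_length.toNat + 1) 0 : Nat) : Int)
      = x + (word_length + ((altRLoop word_length (word_length.toNat + 1) 0 : Nat) : Int)) := fun x => add_assoc _ _ _
  simp only [hassoc]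
  apply pv_foldl_proj
  intro s t x _ hR
  obtain ⟨h1, h2, h3⟩ := hR
  rw [pv_ham_eq, pv_enum_fold_lit, pv_band_mask]
  set W := PySem.List.slice message.toList (some x)
    (some (x + (word_length + ((altRLoop word_length (word_length.toNat + 1) 0 : Nat) : Int)))) with hW
  set S := syndAux W 1 0 with hS
  set R0 := altRLoop word_length (word_length.toNat + 1) 0 with hR0
  by_cases h0 : S % 2 ^ R0 = 0
  · have hA0 : ((S % 2 ^ R0 : Nat) : Int) = 0 := by exact_mod_cast h0
    rw [if_neg (not_not_intro hA0), if_pos hA0]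
    exact ⟨by simp [h1], by simp [h2], by simp [h3]⟩
  · have hA : ((S % 2 ^ R0 : Nat) : Int) ≠ 0 := Int.natCast_ne_zero.mpr h0
    rw [if_pos hA, if_neg hA]
    by_cases hle : ((S % 2 ^ R0 : Nat) : Int) ≤ (W.length : Int)
    · rw [if_neg (not_lt.mpr hle), if_pos hle]
      exact ⟨by simp [h1], by simp [h2], by simp [h3]⟩
    · rw [if_pos (not_le.mp hle), if_neg hle]
      exact ⟨by simp [h1], by simp [h2], by simp [h3]⟩

-- ===== VERDICT (by name: the statement is the Claim_ definition above) =====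
theorem message_processing_spec : Claim_equal_message_processing := by
  intro message word_length _ hpre
  exact message_processing_eq message word_length hpre
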